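-- pv_equiv track=rewrite | github.com/dipcb05/taskwhisper | backend/app/services/provider_catalog.py | _sort_models
-- ===== SOURCE A (Python) =====
-- def _sort_models(models: list[str], kind: str, provider: str) -> list[str]:
--     preferred: dict[tuple[str, str], list[str]] = {
--         ("openai", "llm"): ["gpt-5.4", "gpt-5.4-mini", "gpt-5.4-nano", "gpt-5", "gpt-4.1", "gpt-4o", "o3", "o4-mini", "o1"],
--         ("openai", "stt"): ["gpt-4o-transcribe", "gpt-4o-mini-transcribe", "whisper-1"],
--         ("anthropic", "llm"): ["claude-opus-4-7", "claude-sonnet-4-6", "claude-haiku-4-5"],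
--         ("google", "llm"): ["gemini-2.5-pro", "gemini-2.5-flash", "gemini-2.5-flash-lite"],
--         ("google", "stt"): ["gemini-2.5-flash", "gemini-2.5-flash-lite"],
--         ("gemini", "llm"): ["gemini-2.5-pro", "gemini-2.5-flash", "gemini-2.5-flash-lite"],
--         ("gemini", "stt"): ["gemini-2.5-flash", "gemini-2.5-flash-lite"],
--         ("groq", "llm"): ["openai/gpt-oss-120b", "openai/gpt-oss-20b", "llama-3.3-70b-versatile", "meta-llama/llama-4-scout-17b-16e-instruct", "llama-3.1-8b-instant"],
--         ("groq", "stt"): ["whisper-large-v3-turbo", "whisper-large-v3"],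
--         ("xai", "llm"): ["grok-4.20-reasoning", "grok-4.20-non-reasoning", "grok-4-1-fast-reasoning", "grok-4-1-fast-non-reasoning"],
--     }
--
--     order = preferred.get((provider, kind), [])
--     rank = {model: index for index, model in enumerate(order)}
--
--     return sorted(
--         models,
--         key=lambda model: (
--             rank.get(model, len(rank)),
--             model.lower(),
--         ),
--     )
-- ===== SOURCE B (Python) =====
-- def _sort_models(models: list[str], kind: str, provider: str) -> list[str]:
--     # flat rows instead of a dict keyed by (provider, kind)
--     pref_rows = [
--         ("openai", "llm", "gpt-5.4"), ("openai", "llm", "gpt-5.4-mini"),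
--         ("openai", "llm", "gpt-5.4-nano"), ("openai", "llm", "gpt-5"),
--         ("openai", "llm", "gpt-4.1"), ("openai", "llm", "gpt-4o"),
--         ("openai", "llm", "o3"), ("openai", "llm", "o4-mini"), ("openai", "llm", "o1"),
--         ("openai", "stt", "gpt-4o-transcribe"), ("openai", "stt", "gpt-4o-mini-transcribe"),
--         ("openai", "stt", "whisper-1"),
--         ("anthropic", "llm", "claude-opus-4-7"), ("anthropic", "llm", "claude-sonnet-4-6"),
--         ("anthropic", "llm", "claude-haiku-4-5"),
--         ("google", "llm", "gemini-2.5-pro"), ("google", "llm", "gemini-2.5-flash"),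
--         ("google", "llm", "gemini-2.5-flash-lite"),
--         ("google", "stt", "gemini-2.5-flash"), ("google", "stt", "gemini-2.5-flash-lite"),
--         ("gemini", "llm", "gemini-2.5-pro"), ("gemini", "llm", "gemini-2.5-flash"),
--         ("gemini", "llm", "gemini-2.5-flash-lite"),
--         ("gemini", "stt", "gemini-2.5-flash"), ("gemini", "stt", "gemini-2.5-flash-lite"),
--         ("groq", "llm", "openai/gpt-oss-120b"), ("groq", "llm", "openai/gpt-oss-20b"),
--         ("groq", "llm", "llama-3.3-70b-versatile"),
--         ("groq", "llm", "meta-llama/llama-4-scout-17b-16e-instruct"),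
--         ("groq", "llm", "llama-3.1-8b-instant"),
--         ("groq", "stt", "whisper-large-v3-turbo"), ("groq", "stt", "whisper-large-v3"),
--         ("xai", "llm", "grok-4.20-reasoning"), ("xai", "llm", "grok-4.20-non-reasoning"),
--         ("xai", "llm", "grok-4-1-fast-reasoning"), ("xai", "llm", "grok-4-1-fast-non-reasoning"),
--     ]
--     order = [name for (p, k, name) in pref_rows if p == provider and k == kind]
--     # phase 1: every occurrence of each preferred name, in preferred order
--     out = []
--     for name in order:
--         out += [m for m in models if m == name]
--     # phase 2: the non-preferred models, stably sorted by lowercased name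
--     rest = sorted((m for m in models if m not in order), key=str.lower)
--     return out + rest
-- ===== Notes on version B (the rewrite author's own statement) =====
-- stated objective: alternative
-- what changed: A builds a rank dict from a (provider,kind)-keyed table and runs one global stable sort on the tuple key (rank, name.lower()); B keeps the preferences as a flat list of (provider,kind,name) rows, selects the order by filtering it, emits each preferred name's occurrences in that order, and appends the non-preferred models stably sorted by lowercased name alone.
import Mathlib
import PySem

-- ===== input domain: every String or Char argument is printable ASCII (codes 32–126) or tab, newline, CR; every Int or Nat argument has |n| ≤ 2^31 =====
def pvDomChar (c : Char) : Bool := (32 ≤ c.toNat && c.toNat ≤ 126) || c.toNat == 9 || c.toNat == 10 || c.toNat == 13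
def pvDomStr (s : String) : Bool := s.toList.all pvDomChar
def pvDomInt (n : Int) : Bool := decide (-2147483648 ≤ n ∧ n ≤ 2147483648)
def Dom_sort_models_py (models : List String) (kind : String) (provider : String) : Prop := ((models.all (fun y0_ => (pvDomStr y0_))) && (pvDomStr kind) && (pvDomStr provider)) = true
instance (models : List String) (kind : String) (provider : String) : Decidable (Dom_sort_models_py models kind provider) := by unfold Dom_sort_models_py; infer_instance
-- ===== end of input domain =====

-- B replaces A's rank-dict + single tuple-key sort by a flat (provider, kind, name) row list
-- filtered at runtime: it emits the occurrences of the preferred names in their fixed order,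
-- then the remaining models stably sorted by lowercased name.
-- Objective: alternative decomposition; equivalence proved for all inputs.

-- ===== PORT A =====
-- the literal `preferred` dict of A
def preferredTable : PySem.Dict (String × String) (List String) :=
  PySem.Dict.ofList [
    (("openai", "llm"), ["gpt-5.4", "gpt-5.4-mini", "gpt-5.4-nano", "gpt-5", "gpt-4.1", "gpt-4o", "o3", "o4-mini", "o1"]),
    (("openai", "stt"), ["gpt-4o-transcribe", "gpt-4o-mini-transcribe", "whisper-1"]),
    (("anthropic", "llm"), ["claude-opus-4-7", "claude-sonnet-4-6", "claude-haiku-4-5"]),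
    (("google", "llm"), ["gemini-2.5-pro", "gemini-2.5-flash", "gemini-2.5-flash-lite"]),
    (("google", "stt"), ["gemini-2.5-flash", "gemini-2.5-flash-lite"]),
    (("gemini", "llm"), ["gemini-2.5-pro", "gemini-2.5-flash", "gemini-2.5-flash-lite"]),
    (("gemini", "stt"), ["gemini-2.5-flash", "gemini-2.5-flash-lite"]),
    (("groq", "llm"), ["openai/gpt-oss-120b", "openai/gpt-oss-20b", "llama-3.3-70b-versatile", "meta-llama/llama-4-scout-17b-16e-instruct", "llama-3.1-8b-instant"]),
    (("groq", "stt"), ["whisper-large-v3-turbo", "whisper-large-v3"]),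
    (("xai", "llm"), ["grok-4.20-reasoning", "grok-4.20-non-reasoning", "grok-4-1-fast-reasoning", "grok-4-1-fast-non-reasoning"])]

def sort_models_py (models : List String) (kind : String) (provider : String) : List String :=
  let order := preferredTable.getD (provider, kind) []
  -- rank = {model: index for index, model in enumerate(order)}
  let rank : PySem.Dict String Int :=
    (PySem.List.enumerate order).foldl (fun d p => d.insert p.2 p.1) PySem.Dict.empty
  PySem.List.sorted2 models (fun model => rank.getD model (rank.size : Int))
    (fun model => PySem.Str.lower model)

-- ===== PORT B =====
-- B's flat row list `pref_rows`
def prefRows : List (String × String × String) := [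
  ("openai", "llm", "gpt-5.4"), ("openai", "llm", "gpt-5.4-mini"),
  ("openai", "llm", "gpt-5.4-nano"), ("openai", "llm", "gpt-5"),
  ("openai", "llm", "gpt-4.1"), ("openai", "llm", "gpt-4o"),
  ("openai", "llm", "o3"), ("openai", "llm", "o4-mini"), ("openai", "llm", "o1"),
  ("openai", "stt", "gpt-4o-transcribe"), ("openai", "stt", "gpt-4o-mini-transcribe"),
  ("openai", "stt", "whisper-1"),
  ("anthropic", "llm", "claude-opus-4-7"), ("anthropic", "llm", "claude-sonnet-4-6"),
  ("anthropic", "llm", "claude-haiku-4-5"),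
  ("google", "llm", "gemini-2.5-pro"), ("google", "llm", "gemini-2.5-flash"),
  ("google", "llm", "gemini-2.5-flash-lite"),
  ("google", "stt", "gemini-2.5-flash"), ("google", "stt", "gemini-2.5-flash-lite"),
  ("gemini", "llm", "gemini-2.5-pro"), ("gemini", "llm", "gemini-2.5-flash"),
  ("gemini", "llm", "gemini-2.5-flash-lite"),
  ("gemini", "stt", "gemini-2.5-flash"), ("gemini", "stt", "gemini-2.5-flash-lite"),
  ("groq", "llm", "openai/gpt-oss-120b"), ("groq", "llm", "openai/gpt-oss-20b"),
  ("groq", "llm", "llama-3.3-70b-versatile"),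
  ("groq", "llm", "meta-llama/llama-4-scout-17b-16e-instruct"),
  ("groq", "llm", "llama-3.1-8b-instant"),
  ("groq", "stt", "whisper-large-v3-turbo"), ("groq", "stt", "whisper-large-v3"),
  ("xai", "llm", "grok-4.20-reasoning"), ("xai", "llm", "grok-4.20-non-reasoning"),
  ("xai", "llm", "grok-4-1-fast-reasoning"), ("xai", "llm", "grok-4-1-fast-non-reasoning")]

def sort_models_py_alt (models : List String) (kind : String) (provider : String) : List String :=
  let order := (prefRows.filter (fun r => r.1 == provider && r.2.1 == kind)).map (fun r => r.2.2)
  let out := order.foldl (fun acc name => acc ++ models.filter (fun m => m == name)) []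
  let rest := models.filter (fun m => !(order.contains m))
  out ++ PySem.List.sorted rest (fun m => PySem.Str.lower m)

-- ===== PRECONDITION & SPEC =====
def Spec_sort_models_py (models : List String) (kind : String) (provider : String) (out : List String) : Prop := out = sort_models_py_alt models kind provider
instance (models : List String) (kind : String) (provider : String) (out : List String) : Decidable (Spec_sort_models_py models kind provider out) := by unfold Spec_sort_models_py; infer_instance

-- ===== CLAIM (what is proved, stated in full; the proofs are below) =====
def Claim_equal_sort_models_py : Prop := ∀ (models : List String) (kind : String) (provider : String), Dom_sort_models_py models kind provider → Spec_sort_models_py models kind provider (sort_models_py models kind provider)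

-- ===== LEMMAS AND PROOFS =====

-- the insertion-sort fold that PySem.List.sorted / sorted2 are defined as
def insF {α : Type} (c : α → α → Bool) (xs acc : List α) : List α :=
  xs.foldl (fun a x => PySem.List.insertBy c x a) acc

lemma sorted2_eq_insF (xs : List String) (k1 : String → Int) (k2 : String → String) :
    PySem.List.sorted2 xs k1 k2 =
      insF (fun a b => decide (k1 a < k1 b) || (!decide (k1 b < k1 a) && decide (k2 a < k2 b))) xs [] := rfl

lemma sorted_eq_insF (xs : List String) (key : String → String) :
    PySem.List.sorted xs key = insF (fun a b => decide (key a < key b)) xs [] := rfl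

lemma insertBy_append_left {α : Type} (c : α → α → Bool) (x : α) (A B : List α)
    (h : ∀ b ∈ B, c x b = true) :
    PySem.List.insertBy c x (A ++ B) = PySem.List.insertBy c x A ++ B := by
  induction A with
  | nil =>
    cases B with
    | nil => simp [PySem.List.insertBy]
    | cons b B' => simp [PySem.List.insertBy, h b (by simp)]
  | cons a A' ih =>
    by_cases hca : c x a = true
    · simp [PySem.List.insertBy, hca]
    · simp [PySem.List.insertBy, hca, ih]

lemma insertBy_append_right {α : Type} (c : α → α → Bool) (x : α) (A B : List α)
    (h : ∀ a ∈ A, c x a = false) :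
    PySem.List.insertBy c x (A ++ B) = A ++ PySem.List.insertBy c x B := by
  induction A with
  | nil => simp
  | cons a A' ih =>
    have : c x a = false := h a (by simp)
    simp [PySem.List.insertBy, this]
    exact ih (fun a ha => h a (by simp [ha]))

lemma insertBy_last {α : Type} (c : α → α → Bool) (x : α) (A : List α)
    (h : ∀ a ∈ A, c x a = false) :
    PySem.List.insertBy c x A = A ++ [x] := by
  have := insertBy_append_right c x A [] h
  simpa [PySem.List.insertBy] using this

lemma insertBy_congr {α : Type} (c c' : α → α → Bool) (x : α) (A : List α)
    (h : ∀ a ∈ A, c x a = c' x a) :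
    PySem.List.insertBy c x A = PySem.List.insertBy c' x A := by
  induction A with
  | nil => rfl
  | cons a A' ih =>
    have ha : c x a = c' x a := h a (by simp)
    by_cases hca : c' x a = true
    · simp [PySem.List.insertBy, ha, hca]
    · simp only [PySem.List.insertBy]
      rw [ha]
      simp [hca]
      exact ih (fun a ha' => h a (by simp [ha']))

lemma insF_split {α : Type} (c : α → α → Bool) (p : α → Bool)
    (h : ∀ x y, p x = true → p y = false → c x y = true ∧ c y x = false) :
    ∀ (xs A B : List α), (∀ a ∈ A, p a = true) → (∀ b ∈ B, p b = false) →
      insF c xs (A ++ B) = insF c (xs.filter p) A ++ insF c (xs.filter (fun x => !p x)) B := by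
  intro xs
  induction xs with
  | nil => intro A B _ _; simp [insF]
  | cons x xs ih =>
    intro A B hA hB
    by_cases hp : p x = true
    · have hstep : PySem.List.insertBy c x (A ++ B) = PySem.List.insertBy c x A ++ B :=
        insertBy_append_left c x A B (fun b hb => (h x b hp (hB b hb)).1)
      have hA' : ∀ a ∈ PySem.List.insertBy c x A, p a = true := by
        intro a ha
        rcases (PySem.List.mem_insertBy c x a A).1 ha with rfl | ha'
        · exact hp
        · exact hA a ha'
      simp only [insF, List.foldl_cons, List.filter_cons, hp]
      rw [hstep]
      simpa [insF] using ih (PySem.List.insertBy c x A) B hA' hB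
    · have hpx : p x = false := by simpa using hp
      have hstep : PySem.List.insertBy c x (A ++ B) = A ++ PySem.List.insertBy c x B :=
        insertBy_append_right c x A B (fun a ha => (h a x (hA a ha) hpx).2)
      have hB' : ∀ b ∈ PySem.List.insertBy c x B, p b = false := by
        intro b hb
        rcases (PySem.List.mem_insertBy c x b B).1 hb with rfl | hb'
        · exact hpx
        · exact hB b hb'
      simp only [insF, List.foldl_cons, List.filter_cons, hpx]
      rw [hstep]
      simpa [insF] using ih A (PySem.List.insertBy c x B) hA hB'

lemma insF_congr {α : Type} (c c' : α → α → Bool) (P : α → Prop)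
    (hc : ∀ x y, P x → P y → c x y = c' x y) :
    ∀ (xs acc : List α), (∀ x ∈ xs, P x) → (∀ a ∈ acc, P a) →
      insF c xs acc = insF c' xs acc := by
  intro xs
  induction xs with
  | nil => intro acc _ _; rfl
  | cons x xs ih =>
    intro acc hxs hacc
    have hx : P x := hxs x (by simp)
    have hstep : PySem.List.insertBy c x acc = PySem.List.insertBy c' x acc :=
      insertBy_congr c c' x acc (fun a ha => hc x a hx (hacc a ha))
    have hacc' : ∀ a ∈ PySem.List.insertBy c' x acc, P a := by
      intro a ha
      rcases (PySem.List.mem_insertBy c' x a acc).1 ha with rfl | ha'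
      · exact hx
      · exact hacc a ha'
    simp only [insF, List.foldl_cons]
    rw [hstep]
    exact ih _ (fun y hy => hxs y (by simp [hy])) hacc'

lemma insF_const {α : Type} (c : α → α → Bool) (v : α) (hvv : c v v = false) :
    ∀ (xs acc : List α), (∀ x ∈ xs, x = v) → (∀ a ∈ acc, a = v) →
      insF c xs acc = acc ++ xs := by
  intro xs
  induction xs with
  | nil => intro acc _ _; simp [insF]
  | cons x xs ih =>
    intro acc hxs hacc
    have hx : x = v := hxs x (by simp)
    subst hx
    have hstep : PySem.List.insertBy c x acc = acc ++ [x] := by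
      apply insertBy_last
      intro a ha; rw [hacc a ha]; exact hvv
    simp only [insF, List.foldl_cons]
    rw [hstep]
    have := ih (acc ++ [x]) (fun y hy => hxs y (by simp [hy]))
      (by intro a ha; rcases List.mem_append.1 ha with ha' | ha'
          · exact hacc a ha'
          · simpa using ha')
    rw [insF] at this
    rw [this]
    simp

-- the comparator of A's sorted2 once the rank dict is expressed through idxOf
def cFor (ord : List String) (a b : String) : Bool :=
  decide ((ord.idxOf a : Int) < (ord.idxOf b : Int)) ||
    (!decide ((ord.idxOf b : Int) < (ord.idxOf a : Int)) &&
      decide (PySem.Str.lower a < PySem.Str.lower b))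

-- B's phase 1 as a flatMap
def bucketF (ord models : List String) : List String :=
  ord.flatMap (fun nm => models.filter (fun m => m == nm))

lemma main_split (ord : List String) (hnd : ord.Nodup) :
    ∀ models : List String,
      insF (cFor ord) models [] =
        bucketF ord models ++
          insF (fun a b => decide (PySem.Str.lower a < PySem.Str.lower b))
            (models.filter (fun m => !(ord.contains m))) [] := by
  induction ord with
  | nil =>
    intro models
    have hc : cFor [] = fun a b => decide (PySem.Str.lower a < PySem.Str.lower b) := by
      funext a b
      simp [cFor]
    rw [hc]
    simp [bucketF]
  | cons nm rest ih =>
    intro models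
    have hnm : nm ∉ rest := (List.nodup_cons.1 hnd).1
    have hndr : rest.Nodup := (List.nodup_cons.1 hnd).2
    -- index facts
    have hidx0 : List.idxOf nm (nm :: rest) = 0 := by simp
    have hidx1 : ∀ y : String, y ≠ nm → List.idxOf y (nm :: rest) = List.idxOf y rest + 1 := by
      intro y hy
      simp [(by simpa using (Ne.symm hy) : ¬ nm = y)]
    -- split preferred head vs the rest
    have hsplit := insF_split (cFor (nm :: rest)) (fun m => m == nm)
      (by
        intro x y hx hy
        have hx' : x = nm := by simpa using hx
        have hy' : y ≠ nm := by simpa using hy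
        subst hx'
        constructor
        · simp [cFor, hidx0, hidx1 y hy']
          try omega
        · simp [cFor, hidx0, hidx1 y hy']
          try omega)
      models [] []
      (by intro a ha; simp at ha) (by intro b hb; simp at hb)
    simp only [List.nil_append] at hsplit
    rw [hsplit]
    -- phase-1 part: all elements equal nm, comparator irreflexive there
    have hconst : insF (cFor (nm :: rest)) (models.filter (fun m => m == nm)) [] =
        models.filter (fun m => m == nm) := by
      have := insF_const (cFor (nm :: rest)) nm (by simp [cFor])
        (models.filter (fun m => m == nm)) []
        (by intro x hx; simpa using (List.mem_filter.1 hx).2)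
        (by intro a ha; simp at ha)
      simpa using this
    rw [hconst]
    -- remainder: comparator agrees with cFor rest on non-nm elements
    have hcongr : insF (cFor (nm :: rest)) (models.filter (fun m => !(m == nm))) [] =
        insF (cFor rest) (models.filter (fun m => !(m == nm))) [] := by
      apply insF_congr (cFor (nm :: rest)) (cFor rest) (fun m => m ≠ nm)
      · intro x y hx hy
        simp [cFor, hidx1 x hx, hidx1 y hy]
      · intro x hx; simpa using (List.mem_filter.1 hx).2
      · intro a ha; simp at ha
    rw [hcongr, ih hndr (models.filter (fun m => !(m == nm)))]
    -- reassemble the two pieces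
    have hbucket : bucketF rest (models.filter (fun m => !(m == nm))) = bucketF rest models := by
      unfold bucketF
      apply List.flatMap_congr
      intro nm' hnm'
      rw [List.filter_filter]
      apply List.filter_congr
      intro m _
      by_cases hm : m = nm'
      · subst hm
        have : m ≠ nm := fun h => hnm (h ▸ hnm')
        simp [this]
      · simp [hm]
    have hrest : (models.filter (fun m => !(m == nm))).filter (fun m => !(rest.contains m)) =
        models.filter (fun m => !((nm :: rest).contains m)) := by
      rw [List.filter_filter]
      apply List.filter_congr
      intro m _
      by_cases h1 : m = nm <;> by_cases h2 : m ∈ rest <;> simp [h1, h2]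
    rw [hbucket, hrest]
    simp [bucketF]

-- the rank dict built from enumerate(order) looked up with default len(rank) is idxOf
lemma enum_map_snd {α : Type} (xs : List α) (s : Int) :
    (PySem.List.enumerate xs s).map Prod.snd = xs := by
  induction xs generalizing s with
  | nil => rfl
  | cons x t ih => simp [PySem.List.enumerate, ih]

lemma enum_mem_idxOf (xs : List String) (s : Int) (m : String) (hm : m ∈ xs) :
    (s + (xs.idxOf m : Int), m) ∈ PySem.List.enumerate xs s := by
  induction xs generalizing s with
  | nil => simp at hm
  | cons x t ih =>
    by_cases hx : x = m
    · subst hx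
      simp [PySem.List.enumerate]
    · have hmt : m ∈ t := by
        rcases List.mem_cons.1 hm with h | h
        · exact absurd h.symm hx
        · exact h
      have := ih (s + 1) hmt
      have harith : s + 1 + (t.idxOf m : Int) = s + ((t.idxOf m + 1 : Nat) : Int) := by
        push_cast; ring
      rw [harith] at this
      simp only [PySem.List.enumerate, List.idxOf_cons]
      rw [show (x == m) = false by simpa using hx]
      simp only [cond_false]
      exact List.mem_cons_of_mem _ this

def rankD (ord : List String) : PySem.Dict String Int :=
  (PySem.List.enumerate ord).foldl (fun d p => d.insert p.2 p.1) PySem.Dict.empty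

lemma rankD_items (ord : List String) (hnd : ord.Nodup) :
    (rankD ord).items = (PySem.List.enumerate ord).map (fun p => (p.2, p.1)) := by
  have h := PySem.Dict.items_foldl_insert_fresh (PySem.List.enumerate ord)
    (fun p => p.2) (fun p => p.1) PySem.Dict.empty
    (by intro a _; exact PySem.Dict.contains_empty _)
    (by rw [show (fun p : Int × String => p.2) = Prod.snd from rfl, enum_map_snd]; exact hnd)
  simpa [rankD, PySem.Dict.empty] using h

lemma rank_getD (ord : List String) (hnd : ord.Nodup) (m : String) :
    (rankD ord).getD m ((rankD ord).size : Int) = (ord.idxOf m : Int) := by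
  have hitems := rankD_items ord hnd
  have hkeys : (rankD ord).keys = ord := by
    simp only [PySem.Dict.keys, hitems, List.map_map]
    exact enum_map_snd ord 0
  have hsize : (rankD ord).size = ord.length := by
    simp only [PySem.Dict.size, hitems, List.length_map]
    have h := enum_map_snd ord 0
    calc (PySem.List.enumerate ord).length
        = ((PySem.List.enumerate ord).map Prod.snd).length := (List.length_map _).symm
      _ = ord.length := by rw [h]
  by_cases hm : m ∈ ord
  · apply PySem.Dict.getD_of_mem_items
    · rw [hitems]
      have := enum_mem_idxOf ord 0 m hm
      have h2 := List.mem_map_of_mem (f := fun p : Int × String => (p.2, p.1)) this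
      simpa using h2
    · rw [hkeys]; exact hnd
  · have hcont : (rankD ord).contains m = false := by
      have : ¬ (rankD ord).contains m = true := by
        rw [PySem.Dict.contains_iff_mem_keys, hkeys]
        exact hm
      simpa using this
    rw [PySem.Dict.getD_of_not_contains _ _ hcont, hsize, List.idxOf_eq_length hm]

-- the ten keys of A's table
def keyList : List (String × String) :=
  [("openai", "llm"), ("openai", "stt"), ("anthropic", "llm"), ("google", "llm"),
   ("google", "stt"), ("gemini", "llm"), ("gemini", "stt"), ("groq", "llm"),
   ("groq", "stt"), ("xai", "llm")]

-- every order list in A's table is duplicate-free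
lemma lookup_nodup (pk : String × String) : (preferredTable.getD pk []).Nodup := by
  rcases h : preferredTable.get? pk with _ | v
  · rw [PySem.Dict.getD_eq_get?_getD, h]; simp
  · rw [PySem.Dict.getD_eq_get?_getD, h]
    have hmem := PySem.Dict.mem_items_of_get?_eq_some _ h
    have : (pk, v) ∈ preferredTable.items := hmem
    rw [show preferredTable.items = [
      (("openai", "llm"), ["gpt-5.4", "gpt-5.4-mini", "gpt-5.4-nano", "gpt-5", "gpt-4.1", "gpt-4o", "o3", "o4-mini", "o1"]),
      (("openai", "stt"), ["gpt-4o-transcribe", "gpt-4o-mini-transcribe", "whisper-1"]),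
      (("anthropic", "llm"), ["claude-opus-4-7", "claude-sonnet-4-6", "claude-haiku-4-5"]),
      (("google", "llm"), ["gemini-2.5-pro", "gemini-2.5-flash", "gemini-2.5-flash-lite"]),
      (("google", "stt"), ["gemini-2.5-flash", "gemini-2.5-flash-lite"]),
      (("gemini", "llm"), ["gemini-2.5-pro", "gemini-2.5-flash", "gemini-2.5-flash-lite"]),
      (("gemini", "stt"), ["gemini-2.5-flash", "gemini-2.5-flash-lite"]),
      (("groq", "llm"), ["openai/gpt-oss-120b", "openai/gpt-oss-20b", "llama-3.3-70b-versatile", "meta-llama/llama-4-scout-17b-16e-instruct", "llama-3.1-8b-instant"]),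
      (("groq", "stt"), ["whisper-large-v3-turbo", "whisper-large-v3"]),
      (("xai", "llm"), ["grok-4.20-reasoning", "grok-4.20-non-reasoning", "grok-4-1-fast-reasoning", "grok-4-1-fast-non-reasoning"])] from by decide] at this
    simp only [List.mem_cons, List.not_mem_nil, or_false, Prod.mk.injEq] at this
    rcases this with ⟨_, rfl⟩ | ⟨_, rfl⟩ | ⟨_, rfl⟩ | ⟨_, rfl⟩ | ⟨_, rfl⟩ | ⟨_, rfl⟩ | ⟨_, rfl⟩ | ⟨_, rfl⟩ | ⟨_, rfl⟩ | ⟨_, rfl⟩ <;> decide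

-- B's filtered flat rows yield exactly A's dict lookup
set_option maxHeartbeats 4000000 in
lemma order_eq (kind provider : String) :
    (prefRows.filter (fun r => r.1 == provider && r.2.1 == kind)).map (fun r => r.2.2)
      = preferredTable.getD (provider, kind) [] := by
  by_cases h1 : provider = "openai" ∧ kind = "llm"
  · obtain ⟨rfl, rfl⟩ := h1; decide
  by_cases h2 : provider = "openai" ∧ kind = "stt"
  · obtain ⟨rfl, rfl⟩ := h2; decide
  by_cases h3 : provider = "anthropic" ∧ kind = "llm"
  · obtain ⟨rfl, rfl⟩ := h3; decide
  by_cases h4 : provider = "google" ∧ kind = "llm"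
  · obtain ⟨rfl, rfl⟩ := h4; decide
  by_cases h5 : provider = "google" ∧ kind = "stt"
  · obtain ⟨rfl, rfl⟩ := h5; decide
  by_cases h6 : provider = "gemini" ∧ kind = "llm"
  · obtain ⟨rfl, rfl⟩ := h6; decide
  by_cases h7 : provider = "gemini" ∧ kind = "stt"
  · obtain ⟨rfl, rfl⟩ := h7; decide
  by_cases h8 : provider = "groq" ∧ kind = "llm"
  · obtain ⟨rfl, rfl⟩ := h8; decide
  by_cases h9 : provider = "groq" ∧ kind = "stt"
  · obtain ⟨rfl, rfl⟩ := h9; decide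
  by_cases h10 : provider = "xai" ∧ kind = "llm"
  · obtain ⟨rfl, rfl⟩ := h10; decide
  -- (provider, kind) matches no key: both sides are []
  have hnk : (provider, kind) ∉ keyList := by
    simp only [keyList, List.mem_cons, List.not_mem_nil, or_false, Prod.mk.injEq]
    tauto
  have hall : ∀ r ∈ prefRows, (r.1, r.2.1) ∈ keyList := by decide
  have hfil : prefRows.filter (fun r => r.1 == provider && r.2.1 == kind) = [] := by
    rw [List.filter_eq_nil_iff]
    intro r hr hc
    simp only [Bool.and_eq_true, beq_iff_eq] at hc
    obtain ⟨hp, hk⟩ := hc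
    have := hall r hr
    rw [hp, hk] at this
    exact hnk this
  have hkeys : preferredTable.keys = keyList := by decide
  have hcont : preferredTable.contains (provider, kind) = false := by
    rw [← Bool.not_eq_true, PySem.Dict.contains_iff_mem_keys, hkeys]
    exact hnk
  rw [hfil, PySem.Dict.getD_of_not_contains _ _ hcont]
  rfl

-- ===== VERDICT (by name: the statement is the Claim_ definition above) =====
theorem sort_models_py_spec : Claim_equal_sort_models_py := by
  intro models kind provider _
  unfold Spec_sort_models_py sort_models_py sort_models_py_alt
  simp only []
  rw [order_eq kind provider]
  set ord := preferredTable.getD (provider, kind) [] with hord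
  have hnd : ord.Nodup := lookup_nodup (provider, kind)
  have hkey : (fun model => (rankD ord).getD model ((rankD ord).size : Int)) =
      (fun model => (ord.idxOf model : Int)) := funext (rank_getD ord hnd)
  show PySem.List.sorted2 models
      (fun model => (rankD ord).getD model ((rankD ord).size : Int))
      (fun model => PySem.Str.lower model) = _
  rw [hkey, sorted2_eq_insF]
  rw [show (fun a b => decide ((ord.idxOf a : Int) < (ord.idxOf b : Int)) ||
        (!decide ((ord.idxOf b : Int) < (ord.idxOf a : Int)) &&
          decide (PySem.Str.lower a < PySem.Str.lower b))) = cFor ord from rfl]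
  rw [main_split ord hnd models]
  rw [PySem.List.foldl_append_eq_flatMap, sorted_eq_insF]
  rfl
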